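-- pv_equiv track=rewrite | github.com/angelgladin/URI | 1257.py | array_hash
-- ===== SOURCE A (Python) =====
-- def array_hash(ls):
-- 	cl = 0
-- 	tot = 0
-- 	for l in ls:
-- 		for i in range(len(l)):
-- 			tot += (ord(l[i]) - 65) + cl + i
-- 		cl += 1
-- 	return tot
-- ===== SOURCE B (Python) =====
-- def array_hash(ls):
--     tot = 0
--     for cl, l in enumerate(ls):
--         n = len(l)
--         tot += sum(ord(c) - 65 for c in l) + cl * n + n * (n - 1) // 2
--     return tot
-- ===== Notes on version B (the rewrite author's own statement) =====
-- stated objective: alternative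
-- what changed: replaces the inner index loop with a per-string closed form: character sum plus cl*len(l) plus the arithmetic series len(l)*(len(l)-1)//2, accumulated over enumerate(ls)
import Mathlib
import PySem

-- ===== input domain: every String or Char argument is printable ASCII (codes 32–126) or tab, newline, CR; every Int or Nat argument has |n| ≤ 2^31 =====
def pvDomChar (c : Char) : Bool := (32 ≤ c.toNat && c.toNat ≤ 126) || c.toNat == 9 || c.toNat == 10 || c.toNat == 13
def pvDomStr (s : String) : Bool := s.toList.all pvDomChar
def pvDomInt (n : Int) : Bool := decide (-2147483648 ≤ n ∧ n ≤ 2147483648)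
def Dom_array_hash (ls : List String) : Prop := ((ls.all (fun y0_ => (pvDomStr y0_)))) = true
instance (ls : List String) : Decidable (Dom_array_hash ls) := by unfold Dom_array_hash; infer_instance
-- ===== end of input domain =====

-- B replaces A's inner index loop by a per-string closed form (character sum + cl*n + n*(n-1)//2) over enumerate(ls); alternative decomposition, same cost.

-- ===== PORT A =====
-- inner loop: for i in range(len(l)): tot += (ord(l[i]) - 65) + cl + i
def aInner (cl : Int) (l : String) (tot : Int) : Int :=
  (PySem.List.pyRange 0 (l.toList.length : Int) 1).foldl
    (fun tot i =>
      tot + ((PySem.List.pyGetD (l.toList.map (fun c => (c.toNat : Int))) i (-1)) - 65 + cl + i))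
    tot
-- outer loop body: runs the inner loop, then cl += 1
def aStep (st : Int × Int) (l : String) : Int × Int := (st.1 + 1, aInner st.1 l st.2)
def array_hash (ls : List String) : Int := (ls.foldl aStep (0, 0)).2

-- ===== PORT B =====
-- tot += sum(ord(c)-65 for c in l) + cl*n + n*(n-1)//2
def bStep (tot : Int) (p : Int × String) : Int :=
  let n : Int := (p.2.toList.length : Int)
  tot + ((p.2.toList.foldl (fun s c => s + ((c.toNat : Int) - 65)) 0)
         + p.1 * n + PySem.Int.floordiv (n * (n - 1)) 2)
def array_hash_alt (ls : List String) : Int :=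
  (PySem.List.enumerate ls 0).foldl bStep 0

-- ===== PRECONDITION & SPEC =====
def Spec_array_hash (ls : List String) (out : Int) : Prop := out = array_hash_alt ls
instance (ls : List String) (out : Int) : Decidable (Spec_array_hash ls out) := by unfold Spec_array_hash; infer_instance

-- ===== CLAIM (what is proved, stated in full; the proofs are below) =====
def Claim_equal_array_hash : Prop := ∀ (ls : List String), Dom_array_hash ls → Spec_array_hash ls (array_hash ls)

-- ===== LEMMAS AND PROOFS =====

-- floordiv arithmetic: ((n+1)*n) // 2 = (n*(n-1)) // 2 + n
lemma fd_step (n : Int) :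
    PySem.Int.floordiv ((n + 1) * n) 2 = PySem.Int.floordiv (n * (n - 1)) 2 + n := by
  rw [PySem.Int.floordiv_eq_ediv_of_pos (by norm_num), PySem.Int.floordiv_eq_ediv_of_pos (by norm_num)]
  have h : (n + 1) * n = n * (n - 1) + n * 2 := by ring
  rw [h, Int.add_mul_ediv_right _ _ (by norm_num : (2:Int) ≠ 0)]

-- A's inner index loop equals B's closed form for one string.
lemma inner_eq (chars : List Char) (cl tot : Int) :
    (PySem.List.pyRange 0 (chars.length : Int) 1).foldl
      (fun tot i =>
        tot + ((PySem.List.pyGetD (chars.map (fun c => (c.toNat : Int))) i (-1)) - 65 + cl + i))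
      tot
    = tot + ((chars.foldl (fun s c => s + ((c.toNat : Int) - 65)) 0)
             + cl * (chars.length : Int)
             + PySem.Int.floordiv ((chars.length : Int) * ((chars.length : Int) - 1)) 2) := by
  induction chars using List.reverseRecOn generalizing tot with
  | nil => simp [PySem.List.pyRange, PySem.Int.floordiv]
  | append_singleton xs c ih =>
    have hn : ((xs ++ [c]).length : Int) = (xs.length : Int) + 1 := by simp
    rw [hn, PySem.List.pyRange_one_succ_right (by positivity), List.foldl_append]
    have hcong : (PySem.List.pyRange 0 (xs.length : Int) 1).foldl
        (fun tot i =>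
          tot + ((PySem.List.pyGetD ((xs ++ [c]).map (fun c => (c.toNat : Int))) i (-1)) - 65 + cl + i))
        tot
      = (PySem.List.pyRange 0 (xs.length : Int) 1).foldl
        (fun tot i =>
          tot + ((PySem.List.pyGetD (xs.map (fun c => (c.toNat : Int))) i (-1)) - 65 + cl + i))
        tot := by
      apply PySem.List.foldl_congr_mem
      intro acc i hi
      have hmem := (PySem.List.mem_pyRange_one).1 hi
      have h0 : 0 ≤ i := hmem.1
      have h1 : i < ((xs.map (fun c => (c.toNat : Int))).length : Int) := by
        simpa using hmem.2
      have h1' : i < (((xs ++ [c]).map (fun c => (c.toNat : Int))).length : Int) := by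
        simp at h1 ⊢; omega
      rw [PySem.List.pyGetD_eq_getElem _ (-1) h0 h1, PySem.List.pyGetD_eq_getElem _ (-1) h0 h1']
      have hlt : i.toNat < (xs.map (fun c => (c.toNat : Int))).length := by
        simp at h1 ⊢; omega
      congr 2
      simp [List.map_append, List.getElem_append_left hlt]
    rw [hcong, ih]
    have hget : PySem.List.pyGetD ((xs ++ [c]).map (fun c => (c.toNat : Int))) ((xs.length : Int)) (-1)
        = ((c.toNat : Int)) := by
      rw [List.map_append]
      have hl : (xs.length : Int) = ((xs.map (fun c => (c.toNat : Int))).length : Int) := by simp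
      rw [hl]
      simp
    rw [List.foldl_cons, List.foldl_nil, hget, List.foldl_append, List.foldl_cons, List.foldl_nil]
    have h2 : ((xs.length : Int) + 1 - 1) = (xs.length : Int) := by ring
    rw [h2, fd_step]
    ring

-- outer loop invariant: A's fold from (cl, tot) equals B's fold over enumerate ls cl from tot
lemma outer_eq (ls : List String) (cl tot : Int) :
    (ls.foldl aStep (cl, tot)).2 = (PySem.List.enumerate ls cl).foldl bStep tot := by
  induction ls generalizing cl tot with
  | nil => simp [PySem.List.enumerate]
  | cons l rest ih =>
    rw [PySem.List.enumerate_cons, List.foldl_cons, List.foldl_cons]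
    have hstep : aStep (cl, tot) l = (cl + 1, bStep tot (cl, l)) := by
      unfold aStep aInner bStep
      exact congrArg _ (inner_eq l.toList cl tot)
    rw [hstep]
    exact ih (cl + 1) (bStep tot (cl, l))

-- ===== VERDICT (by name: the statement is the Claim_ definition above) =====
theorem array_hash_spec : Claim_equal_array_hash := by
  intro ls _
  show array_hash ls = array_hash_alt ls
  unfold array_hash array_hash_alt
  exact outer_eq ls 0 0
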